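-- pv_equiv track=rewrite | github.com/basarinan/DP_CS_Codee | DP_CS_Code/Assessment_1/VideoTools.py | longestWords
-- ===== SOURCE A (Python) =====
-- import string
--
-- def longestWords(txt):
-- 	#Initially I was planning on making a tool that did the same function but with a precondition that didn't allow punctuation
--
-- 	txt = txt.translate(txt.maketrans('', '', string.punctuation))
-- 	#This is an abstraction I used that I found off the internet
-- 	#This method gets rid of the punctuations and allows us to worry about words only
--
--
-- 	words = txt.split()
-- 	#This is an instance function, it needs something inside to callit, however because I left it blank it looks like a statif function
-- 	#This method splits the txt into just words and puts it in a list, it knows to do that because there is an empty string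
--
--
-- 	tupleslist = []
-- 	#We create a list here so that we can create a list with a tuple
--
-- 	for word in words:
-- 		#we go through the list and append each word to tupleslist along with a new variable that has the length of the word
-- 		wordlength = len(word)
-- 		tupleslist.append((wordlength, word))
--
-- 	tupleslist.sort(reverse = True)
-- 	#Another abstraction used to sort lists, I don't know exactly how it runs but it does the job
-- 	#We sort the list from biggest to smallest
--
-- 	result = []
-- 	#This list is not necessary but I chose to make a list named result just to clarify each list's functions
--
-- 	for i in tupleslist:
-- 		#we loop through this list and add the elements into the result list which we end up returning
--
-- 		result.append(i)
--
--
-- 	return result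
-- ===== SOURCE B (Python) =====
-- import string
--
-- def longestWords(txt):
--     # Group words by length, then emit lengths in descending order,
--     # each bucket's words sorted in descending order.
--     txt = txt.translate(txt.maketrans('', '', string.punctuation))
--     pairs = [(len(w), w) for w in txt.split()]
--     buckets = {}
--     for n, w in pairs:
--         buckets[n] = buckets.get(n, []) + [w]
--     result = []
--     for n in sorted(buckets, reverse=True):
--         result += [(n, w) for w in sorted(buckets[n], reverse=True)]
--     return result
-- ===== Notes on version B (the rewrite author's own statement) =====
-- stated objective: alternative
-- what changed: Replaces the single global reverse tuple-sort with a dict grouping words by length, then emits lengths in descending order with each bucket's words sorted descending.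
import Mathlib
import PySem

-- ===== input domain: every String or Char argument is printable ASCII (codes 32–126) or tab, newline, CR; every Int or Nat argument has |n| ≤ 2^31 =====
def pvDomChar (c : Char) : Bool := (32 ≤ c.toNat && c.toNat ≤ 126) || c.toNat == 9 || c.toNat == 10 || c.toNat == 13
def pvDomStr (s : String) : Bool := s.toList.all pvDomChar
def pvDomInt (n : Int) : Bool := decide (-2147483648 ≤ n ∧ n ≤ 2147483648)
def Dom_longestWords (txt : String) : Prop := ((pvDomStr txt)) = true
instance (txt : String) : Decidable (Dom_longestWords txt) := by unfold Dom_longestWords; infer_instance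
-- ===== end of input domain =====

-- B groups the words by length in a dict and emits each length's bucket in descending
-- order instead of one global tuple sort (objective: alternative decomposition).

-- ===== PORT A =====
-- txt.translate(txt.maketrans('', '', string.punctuation)): hand port, exact — the
-- translation table only DELETES the 32 ASCII punctuation characters, so it is a filter.
def pvStrip (txt : String) : String :=
  String.ofList (txt.toList.filter (fun c => !("!\"#$%&'()*+,-./:;<=>?@[\\]^_`{|}~".toList.contains c)))

def longestWords (txt : String) : List (Int × String) :=
  let txt2 := pvStrip txt
  let words := PySem.Str.split₀ txt2
  let tupleslist := words.foldl (fun acc w => acc ++ [(PySem.Str.len w, w)]) []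
  let tupleslist2 := PySem.List.sorted2 tupleslist (fun p => p.1) (fun p => p.2) true
  tupleslist2.foldl (fun acc i => acc ++ [i]) []

-- ===== PORT B =====
def longestWords_alt (txt : String) : List (Int × String) :=
  let words := PySem.Str.split₀ (pvStrip txt)
  let pairs := words.map (fun w => (PySem.Str.len w, w))
  let buckets := pairs.foldl (fun d p => d.modify p.1 [] (fun x => x ++ [p.2])) PySem.Dict.empty
  let lengths := PySem.List.sorted buckets.keys (fun x => x) true
  lengths.foldl (fun acc n =>
    acc ++ (PySem.List.sorted (buckets.getD n []) (fun w => w) true).map (fun w => (n, w))) []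

-- ===== PRECONDITION & SPEC =====
def Spec_longestWords (txt : String) (out : List (Int × String)) : Prop := out = longestWords_alt txt
instance (txt : String) (out : List (Int × String)) : Decidable (Spec_longestWords txt out) := by unfold Spec_longestWords; infer_instance

-- ===== CLAIM (what is proved, stated in full; the proofs are below) =====
def Claim_equal_longestWords : Prop := ∀ (txt : String), Dom_longestWords txt → Spec_longestWords txt (longestWords txt)

-- ===== LEMMAS AND PROOFS =====

-- the order both programs leave the list in: descending lexicographic ≥ on (length, word)
def pvR (a b : Int × String) : Prop := b.1 < a.1 ∨ (b.1 = a.1 ∧ b.2 ≤ a.2)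

-- the Bool comparison sorted2 … true uses
def pvBef (a b : Int × String) : Bool :=
  decide (b.1 < a.1) || (!decide (a.1 < b.1) && decide (b.2 < a.2))

theorem pvBef_eq_sorted2 (xs : List (Int × String)) :
    PySem.List.sorted2 xs (fun p => p.1) (fun p => p.2) true
      = xs.foldl (fun acc x => PySem.List.insertBy pvBef x acc) [] := rfl

theorem pvR_of_bef_true {a b : Int × String} (h : pvBef a b = true) : pvR a b := by
  unfold pvBef at h; unfold pvR
  rcases Bool.or_eq_true_iff.mp h with h1 | h2
  · exact Or.inl (of_decide_eq_true h1)
  · rcases Bool.and_eq_true_iff.mp h2 with ⟨h3, h4⟩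
    have h3' : ¬ a.1 < b.1 := of_decide_eq_false (by simpa using h3)
    have h4' : b.2 < a.2 := of_decide_eq_true h4
    by_cases hc : b.1 < a.1
    · exact Or.inl hc
    · exact Or.inr ⟨by omega, le_of_lt h4'⟩

theorem pvR_of_bef_false {a b : Int × String} (h : pvBef a b = false) : pvR b a := by
  unfold pvBef at h; unfold pvR
  rcases Bool.or_eq_false_iff.mp h with ⟨h1, h2⟩
  have h1' : ¬ b.1 < a.1 := of_decide_eq_false h1
  rcases Bool.and_eq_false_iff.mp h2 with h3 | h4
  · have : a.1 < b.1 := of_decide_eq_true (by simpa using h3)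
    exact Or.inl this
  · have h4' : ¬ b.2 < a.2 := of_decide_eq_false h4
    by_cases hq : a.1 = b.1
    · exact Or.inr ⟨hq, le_of_not_gt h4'⟩
    · exact Or.inl (by omega)

theorem pvR_trans {a b c : Int × String} (h1 : pvR a b) (h2 : pvR b c) : pvR a c := by
  unfold pvR at *
  rcases h1 with h | ⟨e1, l1⟩ <;> rcases h2 with h' | ⟨e2, l2⟩
  · exact Or.inl (lt_trans h' h)
  · exact Or.inl (e2 ▸ h)
  · exact Or.inl (e1 ▸ h')
  · exact Or.inr ⟨e2.trans e1, le_trans l2 l1⟩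

theorem pvR_antisymm {a b : Int × String} (h1 : pvR a b) (h2 : pvR b a) : a = b := by
  unfold pvR at *
  rcases h1 with h | ⟨e1, l1⟩ <;> rcases h2 with h' | ⟨e2, l2⟩
  · exact absurd h (by omega)
  · exact absurd h (by omega)
  · exact absurd h' (by omega)
  · exact Prod.ext e2 (le_antisymm l2 l1)

theorem pv_insertBy_pairwise (x : Int × String) (l : List (Int × String))
    (h : l.Pairwise pvR) : (PySem.List.insertBy pvBef x l).Pairwise pvR := by
  induction l with
  | nil =>
    rw [PySem.List.insertBy]
    exact List.pairwise_singleton pvR x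
  | cons y ys ih =>
    rw [PySem.List.insertBy]
    rcases List.pairwise_cons.mp h with ⟨hy, hys⟩
    by_cases hb : pvBef x y = true
    · simp only [hb, if_pos]
      refine List.pairwise_cons.mpr ⟨?_, h⟩
      intro z hz
      rcases List.mem_cons.mp hz with rfl | hz'
      · exact pvR_of_bef_true hb
      · exact pvR_trans (pvR_of_bef_true hb) (hy z hz')
    · rw [if_neg hb]
      rw [Bool.not_eq_true] at hb
      refine List.pairwise_cons.mpr ⟨?_, ih hys⟩
      intro z hz
      rcases (PySem.List.mem_insertBy pvBef x z ys).mp hz with rfl | hz'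
      · exact pvR_of_bef_false hb
      · exact hy z hz'

theorem pv_foldl_insertBy_pairwise (xs : List (Int × String)) :
    ∀ acc : List (Int × String), acc.Pairwise pvR →
      (xs.foldl (fun acc x => PySem.List.insertBy pvBef x acc) acc).Pairwise pvR := by
  induction xs with
  | nil => intro acc h; simpa using h
  | cons x xs ih =>
    intro acc h
    simpa using ih _ (pv_insertBy_pairwise x acc h)

theorem pvA_pairwise (xs : List (Int × String)) :
    (PySem.List.sorted2 xs (fun p => p.1) (fun p => p.2) true).Pairwise pvR := by
  rw [pvBef_eq_sorted2]
  exact pv_foldl_insertBy_pairwise xs [] (List.Pairwise.nil)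

-- ---- B side ----

-- the bucket of words of length n
def pvBucket (pairs : List (Int × String)) (n : Int) : List String :=
  (pairs.filter (fun p => p.1 == n)).map (fun p => p.2)

-- one emitted block of B
def pvBlock (pairs : List (Int × String)) (n : Int) : List (Int × String) :=
  (PySem.List.sorted (pvBucket pairs n) (fun w => w) true).map (fun w => (n, w))

theorem pvBlock_fst {pairs : List (Int × String)} {n : Int} {x : Int × String}
    (h : x ∈ pvBlock pairs n) : x.1 = n := by
  unfold pvBlock at h
  rcases List.mem_map.mp h with ⟨w, _, rfl⟩
  rfl

theorem pvBlock_pairwise (pairs : List (Int × String)) (n : Int) :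
    (pvBlock pairs n).Pairwise pvR := by
  unfold pvBlock
  refine List.pairwise_map.mpr ?_
  refine (PySem.List.sorted_pairwise_rev (pvBucket pairs n) (fun w => w)).imp ?_
  intro a b hba
  exact Or.inr ⟨rfl, hba⟩

theorem pvBlock_perm (pairs : List (Int × String)) (n : Int) :
    (pvBlock pairs n).Perm (pairs.filter (fun p => p.1 == n)) := by
  unfold pvBlock
  have h1 := (PySem.List.sorted_perm (pvBucket pairs n) (fun w => w) true).map
    (fun w => ((n, w) : Int × String))
  refine h1.trans ?_
  unfold pvBucket
  rw [List.map_map]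
  have hmap : ∀ p ∈ pairs.filter (fun p => p.1 == n),
      ((fun w => ((n, w) : Int × String)) ∘ (fun p : Int × String => p.2)) p = p := by
    intro p hp
    have := List.of_mem_filter hp
    have hn : p.1 = n := by simpa using this
    simp [Function.comp, ← hn]
  rw [List.map_congr_left hmap]
  simp

theorem pv_flatMap_pairwise (pairs : List (Int × String)) :
    ∀ ls : List Int, ls.Pairwise (fun a b => b < a) →
      (ls.flatMap (pvBlock pairs)).Pairwise pvR := by
  intro ls hls
  induction ls with
  | nil => simp
  | cons n ls ih =>
    rcases List.pairwise_cons.mp hls with ⟨hn, hls'⟩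
    rw [List.flatMap_cons]
    refine List.pairwise_append.mpr ⟨pvBlock_pairwise pairs n, ih hls', ?_⟩
    intro a ha b hb
    rcases List.mem_flatMap.mp hb with ⟨m, hm, hbm⟩
    have h1 : a.1 = n := pvBlock_fst ha
    have h2 : b.1 = m := pvBlock_fst hbm
    exact Or.inl (by rw [h1, h2]; exact hn m hm)

theorem pv_flatMap_congr_perm (pairs : List (Int × String)) (ls : List Int) :
    (ls.flatMap (pvBlock pairs)).Perm
      (ls.flatMap (fun n => pairs.filter (fun p => p.1 == n))) := by
  induction ls with
  | nil => simp
  | cons n ls ih =>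
    rw [List.flatMap_cons, List.flatMap_cons]
    exact (pvBlock_perm pairs n).append ih

theorem pv_flatMap_filter_perm (pairs : List (Int × String)) :
    ∀ ls : List Int, ls.Nodup →
      (ls.flatMap (fun n => pairs.filter (fun p => p.1 == n))).Perm
        (pairs.filter (fun p => decide (p.1 ∈ ls))) := by
  intro ls
  induction ls with
  | nil => simp
  | cons n ls ih =>
    intro hnd
    rcases List.nodup_cons.mp hnd with ⟨hn, hnd'⟩
    rw [List.flatMap_cons]
    refine ((ih hnd').append_left _).trans ?_
    rw [List.perm_iff_count]
    intro x
    have hzero : ∀ p : (Int × String) → Bool, p x = false →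
        List.count x (pairs.filter p) = 0 := by
      intro p hp
      refine List.count_eq_zero.mpr fun hmem => ?_
      have := List.of_mem_filter hmem
      rw [hp] at this
      exact Bool.false_ne_true this
    rw [List.count_append]
    by_cases hx : x.1 = n
    · have hx3 : ¬ x.1 ∈ ls := fun h => hn (hx ▸ h)
      have e1 : List.count x (pairs.filter (fun p => p.1 == n)) = List.count x pairs :=
        List.count_filter (by simp [hx])
      have e2 : List.count x (pairs.filter (fun p => decide (p.1 ∈ ls))) = 0 :=
        hzero _ (by simp [hx3])
      have e3 : List.count x (pairs.filter (fun p => decide (p.1 ∈ n :: ls)))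
          = List.count x pairs := List.count_filter (by simp [hx])
      omega
    · by_cases hx3 : x.1 ∈ ls
      · have e1 : List.count x (pairs.filter (fun p => p.1 == n)) = 0 :=
          hzero _ (by simp [hx])
        have e2 : List.count x (pairs.filter (fun p => decide (p.1 ∈ ls)))
            = List.count x pairs := List.count_filter (by simp [hx3])
        have e3 : List.count x (pairs.filter (fun p => decide (p.1 ∈ n :: ls)))
            = List.count x pairs := List.count_filter (by simp [hx3])
        omega
      · have e1 : List.count x (pairs.filter (fun p => p.1 == n)) = 0 :=
          hzero _ (by simp [hx])
        have e2 : List.count x (pairs.filter (fun p => decide (p.1 ∈ ls))) = 0 :=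
          hzero _ (by simp [hx3])
        have e3 : List.count x (pairs.filter (fun p => decide (p.1 ∈ n :: ls))) = 0 :=
          hzero _ (by simp [hx, hx3])
        omega

theorem pv_perm_of_cover (pairs : List (Int × String)) (ls : List Int)
    (hnd : ls.Nodup) (hcov : ∀ p ∈ pairs, p.1 ∈ ls) :
    (ls.flatMap (pvBlock pairs)).Perm pairs := by
  refine (pv_flatMap_congr_perm pairs ls).trans
    ((pv_flatMap_filter_perm pairs ls hnd).trans ?_)
  rw [List.filter_eq_self.mpr (fun p hp => by simpa using hcov p hp)]

-- the main agreement, over an arbitrary pair list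
theorem pv_main (pairs : List (Int × String)) :
    PySem.List.sorted2 pairs (fun p => p.1) (fun p => p.2) true
      = (PySem.List.sorted (PySem.Set.ofList (pairs.map (fun p => p.1))) (fun x => x) true).flatMap
          (pvBlock pairs) := by
  set ns := pairs.map (fun p => p.1) with hns
  set ls := PySem.List.sorted (PySem.Set.ofList ns) (fun x => x) true with hls
  have hperm : ls.Perm (PySem.Set.ofList ns) := PySem.List.sorted_perm _ _ _
  have hnd : ls.Nodup := hperm.nodup_iff.mpr (PySem.Set.nodup_ofList ns)
  have hgt : ls.Pairwise (fun a b => b < a) := by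
    have hge : ls.Pairwise (fun a b => b ≤ a) :=
      PySem.List.sorted_pairwise_rev (PySem.Set.ofList ns) (fun x => x)
    have := hge.and hnd
    exact this.imp (fun h => lt_of_le_of_ne h.1 (fun e => h.2 e.symm))
  have hcov : ∀ p ∈ pairs, p.1 ∈ ls := by
    intro p hp
    rw [hls, PySem.List.mem_sorted, PySem.Set.mem_ofList]
    exact List.mem_map.mpr ⟨p, hp, rfl⟩
  have hpermA : (PySem.List.sorted2 pairs (fun p => p.1) (fun p => p.2) true).Perm
      (ls.flatMap (pvBlock pairs)) :=
    (PySem.List.sorted2_perm pairs _ _ true).trans (pv_perm_of_cover pairs ls hnd hcov).symm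
  exact List.Perm.eq_of_pairwise (fun a b _ _ h1 h2 => pvR_antisymm h1 h2)
    (pvA_pairwise pairs) (pv_flatMap_pairwise pairs ls hgt) hpermA

-- ===== VERDICT (by name: the statement is the Claim_ definition above) =====
set_option maxHeartbeats 400000 in
theorem longestWords_spec : Claim_equal_longestWords := by
  intro txt _
  unfold Spec_longestWords longestWords longestWords_alt
  simp only [PySem.List.foldl_append_singleton_eq_map, PySem.List.foldl_append_eq_flatMap,
    List.nil_append]
  set words := PySem.Str.split₀ (pvStrip txt) with hw
  set pairs := words.map (fun w => ((PySem.Str.len w : Int), w)) with hp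
  rw [show (fun (x : Int × String) => x) = id from rfl, List.map_id_fun, id]
  have hbucket : ∀ n : Int,
      (pairs.foldl (fun d p => d.modify p.1 [] (fun x => x ++ [p.2])) PySem.Dict.empty).getD n []
        = pvBucket pairs n := by
    intro n
    rw [PySem.Dict.getD_foldl_modify_append]
    simp [pvBucket, PySem.Dict.getD_empty]
  have hkeys :
      (pairs.foldl (fun d p => d.modify p.1 [] (fun x => x ++ [p.2])) PySem.Dict.empty).keys
        = PySem.Set.ofList (pairs.map (fun p => p.1)) := by
    rw [PySem.Dict.keys_foldl_modify_key pairs (fun p => p.1) [] (fun d p x => x ++ [p.2])]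
    rfl
  rw [pv_main pairs]
  rw [hkeys]
  simp only [hbucket]
  unfold pvBlock
  rfl
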